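-- pv_equiv track=rewrite | github.com/IncognitoPeter/informatyka_korki | zestaw_4/zadania_lvl_1.py | factorial_base2dec
-- ===== SOURCE A (Python) =====
-- def factorial_base2dec(n):
--     liczba_10 = 0
--     mnoznik = 1
--     silnia = 1
--     wynik = 0
--     while n != 0:
--         liczba_10 += (n % 10) * mnoznik
--         n = n // 10
--         mnoznik *= silnia
--         silnia += 1
--     mnoznik = 1
--     while liczba_10 != 0:
--         cyfra = liczba_10 % 2
--         wynik += cyfra * mnoznik
--         liczba_10 = liczba_10 // 2
--         mnoznik *= 10
--     return wynik
-- ===== SOURCE B (Python) =====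
-- def factorial_base2dec(n):
--     return _bin(_value(n, 1, 1))
--
--
-- def _value(n, f, k):
--     # sum of factorial-base digit contributions, recursively (no accumulator)
--     if n == 0:
--         return 0
--     return (n % 10) * f + _value(n // 10, f * k, k + 1)
--
--
-- def _bin(v):
--     # binary digits of v read as a base-10 number, built back-to-front
--     if v == 0:
--         return 0
--     return v % 2 + 10 * _bin(v // 2)
-- ===== Notes on version B (the rewrite author's own statement) =====
-- stated objective: simpler
-- what changed: Both accumulator while-loops are replaced by plain recursions: the factorial-base value is summed recursively without a running accumulator, and the binary-digits-as-decimal number is built back-to-front as d + 10*rec with no multiplier state.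
import Mathlib
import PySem

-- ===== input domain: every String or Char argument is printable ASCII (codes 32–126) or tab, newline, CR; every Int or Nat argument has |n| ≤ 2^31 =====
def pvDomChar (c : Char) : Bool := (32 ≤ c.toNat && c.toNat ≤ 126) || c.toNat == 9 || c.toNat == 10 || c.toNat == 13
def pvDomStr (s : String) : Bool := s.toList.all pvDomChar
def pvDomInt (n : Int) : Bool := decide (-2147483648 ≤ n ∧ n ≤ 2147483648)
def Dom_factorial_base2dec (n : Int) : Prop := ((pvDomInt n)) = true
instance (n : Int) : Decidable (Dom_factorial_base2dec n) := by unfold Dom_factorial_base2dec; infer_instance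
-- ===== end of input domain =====

-- B replaces A's two accumulator while-loops by two plain recursions (no multiplier
-- state in the binary step, the result built back-to-front); objective: simpler.

-- ===== PORT A =====
-- first while-loop: liczba_10 += (n % 10) * mnoznik; n //= 10; mnoznik *= silnia; silnia += 1
-- (the dite guard only makes the recursion total: for n > 0 it always holds; Python
-- loops forever on negative n, which Pre_ excludes)
def pvALoop1 (n liczba mnoznik silnia : Int) : Int :=
  if n = 0 then liczba
  else
    let liczba' := liczba + PySem.Int.mod n 10 * mnoznik
    let n' := PySem.Int.floordiv n 10
    if h : n'.natAbs < n.natAbs then pvALoop1 n' liczba' (mnoznik * silnia) (silnia + 1)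
    else liczba'
termination_by n.natAbs
decreasing_by exact h

-- second while-loop: cyfra = liczba_10 % 2; wynik += cyfra * mnoznik; liczba_10 //= 2; mnoznik *= 10
def pvALoop2 (liczba wynik mnoznik : Int) : Int :=
  if liczba = 0 then wynik
  else
    let cyfra := PySem.Int.mod liczba 2
    let wynik' := wynik + cyfra * mnoznik
    let liczba' := PySem.Int.floordiv liczba 2
    if h : liczba'.natAbs < liczba.natAbs then pvALoop2 liczba' wynik' (mnoznik * 10)
    else wynik'
termination_by liczba.natAbs
decreasing_by exact h

def factorial_base2dec (n : Int) : Int :=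
  pvALoop2 (pvALoop1 n 0 1 1) 0 1

-- ===== PORT B =====
-- _value(n, f, k): (n % 10) * f + _value(n // 10, f * k, k + 1), 0 at n = 0
def pvBValue (n f k : Int) : Int :=
  if n = 0 then 0
  else
    let n' := PySem.Int.floordiv n 10
    if h : n'.natAbs < n.natAbs then PySem.Int.mod n 10 * f + pvBValue n' (f * k) (k + 1)
    else 0
termination_by n.natAbs
decreasing_by exact h

-- _bin(v): v % 2 + 10 * _bin(v // 2), 0 at v = 0
def pvBBin (v : Int) : Int :=
  if v = 0 then 0
  else
    let v' := PySem.Int.floordiv v 2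
    if h : v'.natAbs < v.natAbs then PySem.Int.mod v 2 + 10 * pvBBin v'
    else 0
termination_by v.natAbs
decreasing_by exact h

def factorial_base2dec_alt (n : Int) : Int :=
  pvBBin (pvBValue n 1 1)

-- ===== PRECONDITION & SPEC =====
-- Pre_ excludes n < 0, where Python A's first while-loop never terminates (n //= 10 stalls at -1).
def Pre_factorial_base2dec (n : Int) : Prop := 0 ≤ n
instance (n : Int) : Decidable (Pre_factorial_base2dec n) := by unfold Pre_factorial_base2dec; infer_instance
def pvWitness_factorial_base2dec : Int := 201

def Spec_factorial_base2dec (n : Int) (out : Int) : Prop := out = factorial_base2dec_alt n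
instance (n : Int) (out : Int) : Decidable (Spec_factorial_base2dec n out) := by unfold Spec_factorial_base2dec; infer_instance

-- ===== CLAIM (what is proved, stated in full; the proofs are below) =====
def Claim_equal_factorial_base2dec : Prop := ∀ (n : Int), Dom_factorial_base2dec n → Pre_factorial_base2dec n → Spec_factorial_base2dec n (factorial_base2dec n)

-- ===== LEMMAS AND PROOFS =====

lemma pv_dec10 (n : Int) (hn : 0 < n) :
    (PySem.Int.floordiv n 10).natAbs < n.natAbs ∧ 0 ≤ PySem.Int.floordiv n 10 := by
  rw [PySem.Int.floordiv_eq_ediv_of_pos (by norm_num)]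
  omega

lemma pv_dec2 (n : Int) (hn : 0 < n) :
    (PySem.Int.floordiv n 2).natAbs < n.natAbs ∧ 0 ≤ PySem.Int.floordiv n 2 := by
  rw [PySem.Int.floordiv_eq_ediv_of_pos (by norm_num)]
  omega

lemma pv_loop1_eq (N : Nat) :
    ∀ (n : Int), n.natAbs ≤ N → 0 ≤ n → ∀ acc m s,
      pvALoop1 n acc m s = acc + pvBValue n m s := by
  induction N with
  | zero =>
    intro n h1 h2 acc m s
    have hn : n = 0 := by omega
    subst hn
    rw [pvALoop1.eq_def, pvBValue.eq_def]
    simp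
  | succ N ih =>
    intro n h1 h2 acc m s
    by_cases hn : n = 0
    · subst hn; rw [pvALoop1.eq_def, pvBValue.eq_def]; simp
    · have hpos : 0 < n := by omega
      obtain ⟨hlt, hge⟩ := pv_dec10 n hpos
      rw [pvALoop1.eq_def, pvBValue.eq_def]
      simp only [hn, hlt, dif_pos, if_false]
      rw [ih _ (by omega) hge]
      ring

lemma pv_loop2_eq (N : Nat) :
    ∀ (v : Int), v.natAbs ≤ N → 0 ≤ v → ∀ w m,
      pvALoop2 v w m = w + m * pvBBin v := by
  induction N with
  | zero =>
    intro v h1 h2 w m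
    have hv : v = 0 := by omega
    subst hv
    rw [pvALoop2.eq_def, pvBBin.eq_def]
    simp
  | succ N ih =>
    intro v h1 h2 w m
    by_cases hv : v = 0
    · subst hv; rw [pvALoop2.eq_def, pvBBin.eq_def]; simp
    · have hpos : 0 < v := by omega
      obtain ⟨hlt, hge⟩ := pv_dec2 v hpos
      rw [pvALoop2.eq_def, pvBBin.eq_def]
      simp only [hv, hlt, dif_pos, if_false]
      rw [ih _ (by omega) hge]
      ring

lemma pv_bvalue_nonneg (N : Nat) :
    ∀ (n : Int), n.natAbs ≤ N → 0 ≤ n → ∀ f k, 0 ≤ f → 0 ≤ k →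
      0 ≤ pvBValue n f k := by
  induction N with
  | zero =>
    intro n h1 h2 f k hf hk
    have hn : n = 0 := by omega
    subst hn
    rw [pvBValue.eq_def]; simp
  | succ N ih =>
    intro n h1 h2 f k hf hk
    by_cases hn : n = 0
    · subst hn; rw [pvBValue.eq_def]; simp
    · have hpos : 0 < n := by omega
      obtain ⟨hlt, hge⟩ := pv_dec10 n hpos
      rw [pvBValue.eq_def]
      simp only [hn, hlt, dif_pos, if_false]
      have hmod : 0 ≤ PySem.Int.mod n 10 := PySem.Int.mod_nonneg n (by norm_num)
      have := ih _ (by omega) hge (f * k) (k + 1) (by positivity) (by omega)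
      nlinarith

-- ===== VERDICT (by name: the statement is the Claim_ definition above) =====
theorem factorial_base2dec_spec : Claim_equal_factorial_base2dec := by
  intro n _ hpre
  unfold Spec_factorial_base2dec factorial_base2dec factorial_base2dec_alt
  rw [pv_loop1_eq n.natAbs n (le_refl _) hpre 0 1 1]
  have hval : 0 ≤ pvBValue n 1 1 :=
    pv_bvalue_nonneg n.natAbs n (le_refl _) hpre 1 1 (by norm_num) (by norm_num)
  rw [pv_loop2_eq (0 + pvBValue n 1 1).natAbs _ (le_refl _) (by omega) 0 1]
  simp
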